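-- pv_equiv track=rewrite | github.com/zarzen/model-prepare | partition_models.py | strategy1
-- ===== SOURCE A (Python) =====
-- def strategy1(sizes):
--     """
--     """
--     partitions = []
--     # first batch 8MB
--     # the rest 20MB each
--     first_batch = 8 * 1024 * 1024
--
--     batch = []
--     cidx = 0
--     acc = 0
--     while acc < first_batch and cidx < len(sizes):
--         batch.append(cidx)
--
--         acc += sizes[cidx]
--         cidx += 1
--     partitions.append(batch)
--
--     other_batch = 20 * 1024 * 1024
--
--     batch = []
--     acc = 0
--     for i in range(cidx, len(sizes)):
--         if acc < other_batch:
--             pass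
--         else:
--             partitions.append(batch)
--             batch = []
--             acc = 0
--
--         batch.append(i)
--         acc += sizes[i]
--
--     if len(batch) != 0:
--         partitions.append(batch)
--
--     return partitions
-- ===== SOURCE B (Python) =====
-- def strategy1(sizes):
--     partitions = []
--     batch = []
--     acc = 0
--     threshold = 8 * 1024 * 1024
--     for i, s in enumerate(sizes):
--         if acc >= threshold:
--             partitions.append(batch)
--             batch = []
--             acc = 0
--             threshold = 20 * 1024 * 1024
--         batch.append(i)
--         acc += s
--     if batch or not partitions:
--         partitions.append(batch)
--     return partitions
-- ===== Notes on version B (the rewrite author's own statement) =====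
-- stated objective: simpler
-- what changed: Replaces A's two separate threshold loops (a while loop for the 8MB first batch, then a for loop with its own flush logic for 20MB batches) by one single pass over enumerate(sizes) with a threshold variable that switches from 8MB to 20MB at the first flush, plus one unified final-append rule.
import Mathlib
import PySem

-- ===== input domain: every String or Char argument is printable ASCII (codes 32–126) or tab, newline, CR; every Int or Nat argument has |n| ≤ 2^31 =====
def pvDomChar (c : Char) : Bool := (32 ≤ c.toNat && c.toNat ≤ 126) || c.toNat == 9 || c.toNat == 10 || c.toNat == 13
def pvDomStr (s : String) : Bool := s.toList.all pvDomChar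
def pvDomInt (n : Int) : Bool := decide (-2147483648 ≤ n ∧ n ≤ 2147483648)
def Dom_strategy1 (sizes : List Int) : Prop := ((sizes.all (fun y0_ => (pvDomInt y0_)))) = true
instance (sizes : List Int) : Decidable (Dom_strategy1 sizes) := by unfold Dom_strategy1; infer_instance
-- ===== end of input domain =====

-- B merges A's two threshold loops into one single pass (threshold switches from 8MB
-- to 20MB at the first flush); objective: simpler.

-- ===== PORT A =====
-- first `while acc < first_batch and cidx < len(sizes)` loop of A
def strategy1_loop1 (sizes : List Int) (batch : List Int) (cidx : Nat) (acc : Int) :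
    List Int × Nat :=
  if h : acc < 8388608 ∧ cidx < sizes.length then
    strategy1_loop1 sizes (batch ++ [(cidx : Int)]) (cidx + 1) (acc + sizes.getD cidx 0)
  else
    (batch, cidx)
termination_by sizes.length - cidx
decreasing_by omega

-- second `for i in range(cidx, len(sizes))` loop of A
def strategy1_loop2 (sizes : List Int) (partitions : List (List Int)) (batch : List Int)
    (acc : Int) (i : Nat) : List (List Int) × List Int :=
  if h : i < sizes.length then
    if acc < 20971520 then
      strategy1_loop2 sizes partitions (batch ++ [(i : Int)]) (acc + sizes.getD i 0) (i + 1)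
    else
      strategy1_loop2 sizes (partitions ++ [batch]) [(i : Int)] (0 + sizes.getD i 0) (i + 1)
  else
    (partitions, batch)
termination_by sizes.length - i
decreasing_by all_goals omega

def strategy1 (sizes : List Int) : List (List Int) :=
  let t := strategy1_loop1 sizes [] 0 0
  let r := strategy1_loop2 sizes [t.1] [] 0 t.2
  if r.2.length ≠ 0 then r.1 ++ [r.2] else r.1

-- ===== PORT B =====
-- single pass over `enumerate(sizes)` with a switching threshold
def strategy1_alt_loop (partitions : List (List Int)) (batch : List Int) (acc thr : Int)
    (i : Nat) : List Int → List (List Int) × List Int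
  | [] => (partitions, batch)
  | s :: rest =>
    if acc ≥ thr then
      strategy1_alt_loop (partitions ++ [batch]) [(i : Int)] (0 + s) 20971520 (i + 1) rest
    else
      strategy1_alt_loop partitions (batch ++ [(i : Int)]) (acc + s) thr (i + 1) rest

def strategy1_alt (sizes : List Int) : List (List Int) :=
  let r := strategy1_alt_loop [] [] 0 8388608 0 sizes
  if r.2 ≠ [] ∨ r.1 = [] then r.1 ++ [r.2] else r.1

-- ===== PRECONDITION & SPEC =====
def Spec_strategy1 (sizes : List Int) (out : List (List Int)) : Prop := out = strategy1_alt sizes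
instance (sizes : List Int) (out : List (List Int)) : Decidable (Spec_strategy1 sizes out) := by unfold Spec_strategy1; infer_instance

-- ===== CLAIM (what is proved, stated in full; the proofs are below) =====
def Claim_equal_strategy1 : Prop := ∀ (sizes : List Int), Dom_strategy1 sizes → Spec_strategy1 sizes (strategy1 sizes)

-- ===== LEMMAS AND PROOFS =====

-- the two final-append steps, as functions of the loop results (proof helpers)
def pvFinA (r : List (List Int) × List Int) : List (List Int) :=
  if r.2.length ≠ 0 then r.1 ++ [r.2] else r.1

def pvFinB (r : List (List Int) × List Int) : List (List Int) :=
  if r.2 ≠ [] ∨ r.1 = [] then r.1 ++ [r.2] else r.1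

lemma fin_eq (r : List (List Int) × List Int) (h : r.1 ≠ []) : pvFinB r = pvFinA r := by
  unfold pvFinA pvFinB
  by_cases hB : r.2 = [] <;> simp [hB, h]

lemma loop2_end (sizes : List Int) (P : List (List Int)) (b : List Int) (a : Int) (i : Nat)
    (hi : ¬ i < sizes.length) : strategy1_loop2 sizes P b a i = (P, b) := by
  rw [strategy1_loop2, dif_neg hi]

-- loop2 never empties its partitions accumulator
lemma loop2_ne_nil (sizes : List Int) :
    ∀ i P b a, P ≠ [] → (strategy1_loop2 sizes P b a i).1 ≠ [] := by
  intro i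
  induction hn : sizes.length - i using Nat.strong_induction_on generalizing i with
  | _ n ih =>
    intro P b a hP
    rw [strategy1_loop2]
    split
    · split
      · exact ih (sizes.length - (i+1)) (by omega) (i+1) rfl _ _ _ hP
      · exact ih (sizes.length - (i+1)) (by omega) (i+1) rfl _ _ _ (by simp)
    · exact hP

-- facts about `drop`
lemma drop_cons {sizes rest : List Int} {s : Int} {i : Nat} (h : sizes.drop i = s :: rest) :
    i < sizes.length ∧ sizes.getD i 0 = s ∧ sizes.drop (i + 1) = rest := by
  have hi : i < sizes.length := by
    by_contra hc
    rw [List.drop_eq_nil_iff.mpr (by omega)] at h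
    simp at h
  refine ⟨hi, ?_, ?_⟩
  · have h0 : sizes[i]? = some s := by
      have h1 : (sizes.drop i)[0]? = sizes[i + 0]? := List.getElem?_drop
      rw [h] at h1
      simpa using h1.symm
    simp [List.getD, h0]
  · have : sizes.drop (i + 1) = (sizes.drop i).drop 1 := by
      rw [List.drop_drop]
    rw [this, h]
    simp

-- phase 2: with the 20MB threshold fixed, B's loop is A's second loop
lemma phase2 (sizes : List Int) :
    ∀ rest i P b a, rest = sizes.drop i →
      strategy1_alt_loop P b a 20971520 i rest = strategy1_loop2 sizes P b a i := by
  intro rest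
  induction rest with
  | nil =>
    intro i P b a h
    have hi : sizes.length ≤ i := by
      by_contra hc
      have := List.drop_eq_nil_iff.mp h.symm; omega
    rw [strategy1_alt_loop, strategy1_loop2]
    simp [Nat.not_lt.mpr hi]
  | cons s rest ih =>
    intro i P b a h
    obtain ⟨hi, hs, hd⟩ := drop_cons h.symm
    rw [strategy1_alt_loop, strategy1_loop2]
    simp only [dif_pos hi, hs]
    by_cases hacc : a < 20971520
    · rw [if_pos hacc, if_neg (by omega)]
      exact ih (i+1) P _ _ hd.symm
    · rw [if_neg hacc, if_pos (by omega)]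
      exact ih (i+1) _ _ _ hd.symm

-- phase 1: whole program equality down the first loop
lemma phase1 (sizes : List Int) :
    ∀ rest i batch acc, rest = sizes.drop i → acc < 8388608 →
      pvFinB (strategy1_alt_loop [] batch acc 8388608 i rest)
      = pvFinA (strategy1_loop2 sizes [(strategy1_loop1 sizes batch i acc).1] [] 0
          (strategy1_loop1 sizes batch i acc).2) := by
  intro rest
  induction rest with
  | nil =>
    intro i batch acc h _
    have hi : ¬ i < sizes.length := by
      have := List.drop_eq_nil_iff.mp h.symm; omega
    rw [strategy1_alt_loop, strategy1_loop1, dif_neg (fun hh => hi hh.2)]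
    rw [loop2_end sizes _ _ _ _ hi]
    unfold pvFinA pvFinB
    simp
  | cons s rest ih =>
    intro i batch acc h hacc
    obtain ⟨hi, hs, hd⟩ := drop_cons h.symm
    rw [strategy1_alt_loop, if_neg (show ¬ acc ≥ (8388608:Int) by omega)]
    rw [strategy1_loop1, dif_pos ⟨hacc, hi⟩, hs]
    by_cases h2 : acc + s < 8388608
    · exact ih (i + 1) (batch ++ [(i : Int)]) (acc + s) hd.symm h2
    · rw [strategy1_loop1, dif_neg (fun hh => h2 hh.1)]
      cases rest with
      | nil =>
        have hl : ¬ i + 1 < sizes.length := by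
          have := List.drop_eq_nil_iff.mp hd; omega
        rw [strategy1_alt_loop, loop2_end sizes _ _ _ _ hl]
        unfold pvFinA pvFinB
        simp
      | cons s' rest' =>
        obtain ⟨hi2, hs2, hd2⟩ := drop_cons hd
        rw [strategy1_alt_loop, if_pos (show acc + s ≥ (8388608:Int) by omega)]
        rw [phase2 sizes rest' (i + 2) _ _ _ hd2.symm]
        conv_rhs => rw [strategy1_loop2]
        rw [dif_pos hi2, if_pos (by norm_num), hs2]
        simp only [List.nil_append]
        exact fin_eq _ (loop2_ne_nil sizes (i + 2) _ _ _ (by simp))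

-- ===== VERDICT (by name: the statement is the Claim_ definition above) =====
theorem strategy1_spec : Claim_equal_strategy1 := by
  intro sizes _
  unfold Spec_strategy1
  have hA : strategy1 sizes
      = pvFinA (strategy1_loop2 sizes [(strategy1_loop1 sizes [] 0 0).1] [] 0
          (strategy1_loop1 sizes [] 0 0).2) := rfl
  have hB : strategy1_alt sizes = pvFinB (strategy1_alt_loop [] [] 0 8388608 0 sizes) := rfl
  rw [hA, hB]
  exact (phase1 sizes sizes 0 [] 0 (by simp) (by norm_num)).symm
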